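-- pv_equiv track=rewrite | github.com/phc1990/tfm-viu | python/screening.py | looks_like_filter_in_name
-- ===== SOURCE A (Python) =====
-- def looks_like_filter_in_name(name: str, filt: str) -> bool:
--     n = name.upper()
--     f = filt.upper()
--     pats = [
--         f'_{f}_', f'-{f}-', f'_{f}-', f'-{f}_',
--         f'.{f}.', f'.{f}_', f'_{f}.',
--         f'OM{f}', f'{f}OM',
--         f'_{f}.FITS', f'_{f}.FTZ', f'-{f}.FITS', f'-{f}.FTZ'
--     ]
--     return any(p in n for p in pats)
-- ===== SOURCE B (Python) =====
-- def looks_like_filter_in_name(name: str, filt: str) -> bool: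
--     # Single left-to-right scan: at each occurrence of the filter in the
--     # uppercased name, inspect the characters around it instead of testing
--     # 13 materialised context strings for membership.
--     N = name.upper()
--     F = filt.upper()
--     L = len(F)
--     for i in range(len(N) - L + 1):
--         if not N.startswith(F, i):
--             continue
--         pre = N[i - 1] if i > 0 else ''
--         suf = N[i + L] if i + L < len(N) else ''
--         if ((pre in ('_', '-') and suf in ('_', '-'))
--                 or (pre == '.' and suf in ('.', '_'))
--                 or (pre == '_' and suf == '.')
--                 or (i >= 2 and N[i - 2:i] == 'OM')
--                 or N[i + L:i + L + 2] == 'OM'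
--                 or (pre == '-' and N.startswith(('.FITS', '.FTZ'), i + L))):
--             return True
--     return False
-- ===== Notes on version B (the rewrite author's own statement) =====
-- stated objective: alternative
-- what changed: Instead of materialising 13 context strings and testing each for substring membership, B makes one left-to-right scan of the uppercased name and, at each occurrence of the uppercased filter, checks the surrounding characters (prefix/suffix char, OM before/after, .FITS/.FTZ tail) directly.
import Mathlib
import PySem

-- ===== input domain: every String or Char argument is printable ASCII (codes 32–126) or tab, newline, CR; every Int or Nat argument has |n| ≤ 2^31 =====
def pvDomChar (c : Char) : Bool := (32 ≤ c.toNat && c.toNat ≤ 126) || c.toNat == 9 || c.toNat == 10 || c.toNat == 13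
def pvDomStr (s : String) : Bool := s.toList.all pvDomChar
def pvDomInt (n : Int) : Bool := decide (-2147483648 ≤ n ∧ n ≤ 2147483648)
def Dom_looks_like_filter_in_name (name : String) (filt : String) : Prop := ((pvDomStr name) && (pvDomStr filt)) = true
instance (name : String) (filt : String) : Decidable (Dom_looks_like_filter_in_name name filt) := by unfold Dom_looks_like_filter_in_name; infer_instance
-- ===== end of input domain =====

-- B replaces A's 13 materialised context strings + any-membership loop by a single
-- left-to-right scan that inspects the characters around each occurrence of the filter
-- (objective: alternative; same return value, no side effects).

-- ===== PORT A =====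
-- Strings are ported on the List Char side (PySem.Chars), per the PySem convention;
-- the f-string patterns are the corresponding list concatenations, 'p in n' is Chars.isIn.
def pvPatsA (f : List Char) : List (List Char) :=
  [ ['_'] ++ (f ++ ['_']), ['-'] ++ (f ++ ['-']), ['_'] ++ (f ++ ['-']), ['-'] ++ (f ++ ['_']),
    ['.'] ++ (f ++ ['.']), ['.'] ++ (f ++ ['_']), ['_'] ++ (f ++ ['.']),
    ['O','M'] ++ f, f ++ ['O','M'],
    ['_'] ++ (f ++ ['.','F','I','T','S']), ['_'] ++ (f ++ ['.','F','T','Z']),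
    ['-'] ++ (f ++ ['.','F','I','T','S']), ['-'] ++ (f ++ ['.','F','T','Z']) ]

def looks_like_filter_in_name (name : String) (filt : String) : Bool :=
  let n := PySem.Chars.upper name.toList
  let f := PySem.Chars.upper filt.toList
  (pvPatsA f).any (fun p => PySem.Chars.isIn p n)

-- ===== PORT B =====
-- pvCtx is the context test Source B applies at a match position i:
--   pre = N[i-1] if i > 0 else ''  /  suf = N[i+L] if i+L < len(N) else ''  (as Option Char,
--   none = ''); the slices N[i-2:i] (guarded by i >= 2) and N[i+L:i+L+2] are
--   (N.drop (i-2)).take 2 and (N.drop (i+L)).take 2 — exact for these nonnegative bounds;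
--   N.startswith(tup, i+L) is startswith on N.drop (i+L), exact for the nonnegative start.
def pvCtx (N F : List Char) (i : Nat) : Bool :=
  let pre : Option Char := if 0 < i then N[i-1]? else none
  let suf : Option Char := if i + F.length < N.length then N[i+F.length]? else none
  ((pre == some '_' || pre == some '-') && (suf == some '_' || suf == some '-'))
  || (pre == some '.' && (suf == some '.' || suf == some '_'))
  || (pre == some '_' && suf == some '.')
  || (decide (2 ≤ i) && decide ((N.drop (i-2)).take 2 = ['O','M']))
  || decide ((N.drop (i+F.length)).take 2 = ['O','M'])
  || (pre == some '-' && (PySem.Chars.startswith (N.drop (i+F.length)) ['.','F','I','T','S']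
        || PySem.Chars.startswith (N.drop (i+F.length)) ['.','F','T','Z']))

-- Source B's 'for i in range(len(N) - L + 1)' loop: k counts the remaining iterations,
-- i is the current position; N.startswith(F, i) is startswith on N.drop i.
def pvScan (N F : List Char) (i : Nat) : Nat → Bool
  | 0 => false
  | k+1 =>
    if PySem.Chars.startswith (N.drop i) F && pvCtx N F i then true
    else pvScan N F (i+1) k

def looks_like_filter_in_name_alt (name : String) (filt : String) : Bool :=
  let N := PySem.Chars.upper name.toList
  let F := PySem.Chars.upper filt.toList
  pvScan N F 0 (N.length + 1 - F.length)

-- ===== PRECONDITION & SPEC =====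
def Spec_looks_like_filter_in_name (name : String) (filt : String) (out : Bool) : Prop := out = looks_like_filter_in_name_alt name filt
instance (name : String) (filt : String) (out : Bool) : Decidable (Spec_looks_like_filter_in_name name filt out) := by unfold Spec_looks_like_filter_in_name; infer_instance

-- ===== CLAIM (what is proved, stated in full; the proofs are below) =====
def Claim_equal_looks_like_filter_in_name : Prop := ∀ (name : String) (filt : String), Dom_looks_like_filter_in_name name filt → Spec_looks_like_filter_in_name name filt (looks_like_filter_in_name name filt)

-- ===== LEMMAS AND PROOFS =====

-- Prop-level reading of pvCtx (the context Source B demands around a match at i).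
def pvCtxP (N F : List Char) (i : Nat) : Prop :=
  ((0 < i ∧ (N[i-1]? = some '_' ∨ N[i-1]? = some '-')) ∧ (N[i+F.length]? = some '_' ∨ N[i+F.length]? = some '-'))
  ∨ ((0 < i ∧ N[i-1]? = some '.') ∧ (N[i+F.length]? = some '.' ∨ N[i+F.length]? = some '_'))
  ∨ ((0 < i ∧ N[i-1]? = some '_') ∧ N[i+F.length]? = some '.')
  ∨ (2 ≤ i ∧ ['O','M'] <+: N.drop (i-2))
  ∨ (['O','M'] <+: N.drop (i+F.length))
  ∨ ((0 < i ∧ N[i-1]? = some '-') ∧ (['.','F','I','T','S'] <+: N.drop (i+F.length) ∨ ['.','F','T','Z'] <+: N.drop (i+F.length)))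

theorem pv_single_prefix (c : Char) (l : List Char) : [c] <+: l ↔ l.head? = some c := by
  cases l <;> simp [eq_comm]

theorem pv_single_prefix_drop (N : List Char) (c : Char) (j : Nat) :
    [c] <+: N.drop j ↔ N[j]? = some c := by
  rw [pv_single_prefix, List.head?_drop]

theorem pv_head_of_prefix {c : Char} {bs l : List Char} (h : (c :: bs) <+: l) : l.head? = some c := by
  obtain ⟨t, rfl⟩ := h; rfl

theorem pv_prefix_append_iff (a b l : List Char) :
    (a ++ b) <+: l ↔ a <+: l ∧ b <+: l.drop a.length := by
  constructor
  · rintro ⟨t, rfl⟩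
    refine ⟨⟨b ++ t, by simp⟩, ?_⟩
    rw [List.append_assoc, List.drop_left]
    exact ⟨t, rfl⟩
  · rintro ⟨h1, ⟨t2, h2⟩⟩
    refine ⟨t2, ?_⟩
    have ha : List.take a.length l = a := (List.prefix_iff_eq_take.mp h1).symm
    calc a ++ b ++ t2 = List.take a.length l ++ (b ++ t2) := by rw [ha, List.append_assoc]
      _ = List.take a.length l ++ List.drop a.length l := by rw [h2]
      _ = l := List.take_append_drop _ _

theorem pv_infix_exists_drop (sub N : List Char) : sub <:+: N ↔ ∃ j, sub <+: N.drop j := by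
  rw [← PySem.Chars.isIn_iff_infix, ← PySem.Chars.exists_prefix_drop_iff_isIn]

-- generic context decomposition: a ++ F ++ b occurs in N iff F occurs at some i
-- with a ending just before i and b starting right after the match
theorem pv_infix_ctx (a b F N : List Char) :
    (a ++ (F ++ b)) <:+: N ↔
      ∃ i, a.length ≤ i ∧ a <+: N.drop (i - a.length) ∧ F <+: N.drop i ∧ b <+: N.drop (i + F.length) := by
  rw [pv_infix_exists_drop]
  constructor
  · rintro ⟨j, hj⟩
    rw [pv_prefix_append_iff] at hj
    obtain ⟨hA, hFb⟩ := hj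
    rw [List.drop_drop, pv_prefix_append_iff, List.drop_drop] at hFb
    exact ⟨j + a.length, by omega, by simpa using hA, hFb.1, hFb.2⟩
  · rintro ⟨i, hle, hA, hF, hb⟩
    refine ⟨i - a.length, ?_⟩
    rw [pv_prefix_append_iff, List.drop_drop, pv_prefix_append_iff, List.drop_drop]
    have h1 : i - a.length + a.length = i := by omega
    rw [h1]
    exact ⟨hA, hF, hb⟩

theorem pv_infix_cw (c : Char) (b F N : List Char) :
    (([c] ++ (F ++ b)) <:+: N) ↔
      ∃ i, (0 < i ∧ N[i-1]? = some c) ∧ F <+: N.drop i ∧ b <+: N.drop (i + F.length) := by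
  rw [pv_infix_ctx]
  constructor
  · rintro ⟨i, h1, h2, h3, h4⟩
    exact ⟨i, ⟨by simpa using h1, (pv_single_prefix_drop N c (i-1)).mp (by simpa using h2)⟩, h3, h4⟩
  · rintro ⟨i, ⟨hi, hc⟩, h3, h4⟩
    exact ⟨i, by simpa using hi, by simpa using (pv_single_prefix_drop N c (i-1)).mpr hc, h3, h4⟩

theorem pv_infix_cc (c d : Char) (F N : List Char) :
    (([c] ++ (F ++ [d])) <:+: N) ↔
      ∃ i, (0 < i ∧ N[i-1]? = some c) ∧ F <+: N.drop i ∧ N[i+F.length]? = some d := by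
  rw [pv_infix_cw]
  exact exists_congr fun i => by rw [pv_single_prefix_drop]

theorem pv_infix_left2 (c d : Char) (F N : List Char) :
    ((([c] ++ [d]) ++ F) <:+: N) ↔
      ∃ i, 2 ≤ i ∧ ([c] ++ [d]) <+: N.drop (i-2) ∧ F <+: N.drop i := by
  have h : ([c] ++ [d]) ++ F = ([c] ++ [d]) ++ (F ++ []) := by simp
  rw [h, pv_infix_ctx]
  exact exists_congr fun i => by simp

theorem pv_infix_right (b F N : List Char) :
    ((F ++ b) <:+: N) ↔ ∃ i, F <+: N.drop i ∧ b <+: N.drop (i + F.length) := by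
  have h : F ++ b = [] ++ (F ++ b) := by simp
  rw [h, pv_infix_ctx]
  exact exists_congr fun i => by simp

theorem pv_ctx_iff (N F : List Char) (i : Nat) : pvCtx N F i = true ↔ pvCtxP N F i := by
  have hOM1 : (decide ((N.drop (i-2)).take 2 = ['O','M'])) = true ↔ ['O','M'] <+: N.drop (i-2) := by
    rw [decide_eq_true_iff, List.prefix_iff_eq_take]; exact eq_comm
  have hOM2 : (decide ((N.drop (i+F.length)).take 2 = ['O','M'])) = true ↔ ['O','M'] <+: N.drop (i+F.length) := by
    rw [decide_eq_true_iff, List.prefix_iff_eq_take]; exact eq_comm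
  unfold pvCtx pvCtxP
  by_cases hp : 0 < i
  · by_cases hs : i + F.length < N.length
    · simp [hp, hs, hOM1, hOM2, PySem.Chars.startswith_iff]
      simp [or_assoc]
    · have hnone : N[i+F.length]? = none := List.getElem?_eq_none (by omega)
      simp [hp, hs, hOM1, hOM2, PySem.Chars.startswith_iff]
      simp [or_assoc]
  · have h2 : ¬ (2 ≤ i) := by omega
    by_cases hs : i + F.length < N.length
    · simp [hp, hs, h2, hOM2]
    · have hnone : N[i+F.length]? = none := List.getElem?_eq_none (by omega)
      simp [hp, hs, h2, hOM2]

theorem pv_scan_iff (N F : List Char) :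
    ∀ (k i : Nat), pvScan N F i k = true ↔
      ∃ j, i ≤ j ∧ j < i + k ∧ F <+: N.drop j ∧ pvCtxP N F j := by
  intro k
  induction k with
  | zero =>
    intro i
    simp only [pvScan]
    constructor
    · intro h; exact absurd h (by simp)
    · rintro ⟨j, h1, h2, _⟩; omega
  | succ k ih =>
    intro i
    rw [pvScan]
    by_cases h : (PySem.Chars.startswith (N.drop i) F && pvCtx N F i) = true
    · rw [if_pos h]
      rw [Bool.and_eq_true, PySem.Chars.startswith_iff, pv_ctx_iff] at h
      simp only [true_iff]
      exact ⟨i, le_refl i, by omega, h.1, h.2⟩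
    · rw [if_neg h, ih (i+1)]
      rw [Bool.and_eq_true, PySem.Chars.startswith_iff, pv_ctx_iff] at h
      constructor
      · rintro ⟨j, h1, h2, h3⟩; exact ⟨j, by omega, by omega, h3⟩
      · rintro ⟨j, h1, h2, h3, h4⟩
        refine ⟨j, ?_, by omega, h3, h4⟩
        rcases Nat.eq_or_lt_of_le h1 with rfl | hlt
        · exact absurd ⟨h3, h4⟩ h
        · omega

theorem pv_good_bound (N F : List Char) (i : Nat)
    (hF : F <+: N.drop i) (hc : pvCtxP N F i) : i + F.length ≤ N.length := by
  have hlen : F.length ≤ N.length - i := by simpa using hF.length_le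
  have hsome : ∀ c : Char, N[i+F.length]? = some c → i + F.length < N.length := by
    intro c h
    by_contra hcon
    rw [List.getElem?_eq_none (by omega)] at h
    simp at h
  unfold pvCtxP at hc
  rcases hc with ⟨_, hsf⟩ | ⟨_, hsf⟩ | ⟨_, hsf⟩ | ⟨h2, hom⟩ | hom | ⟨_, hsf⟩
  · rcases hsf with h | h <;> exact le_of_lt (hsome _ h)
  · rcases hsf with h | h <;> exact le_of_lt (hsome _ h)
  · exact le_of_lt (hsome _ hsf)
  · have := hom.length_le
    simp only [List.length_cons, List.length_nil, List.length_drop] at this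
    omega
  · have := hom.length_le
    simp only [List.length_cons, List.length_nil, List.length_drop] at this
    omega
  · rcases hsf with h | h <;>
    · have := h.length_le
      simp only [List.length_cons, List.length_nil, List.length_drop] at this
      omega

-- A's 13-pattern disjunction holds iff some position carries the filter with a good context
theorem pv_exists_iff (N F : List Char) :
    (pvPatsA F).any (fun p => PySem.Chars.isIn p N) = true ↔
      ∃ i, F <+: N.drop i ∧ pvCtxP N F i := by
  simp only [pvPatsA, List.any_cons, List.any_nil, Bool.or_eq_true, Bool.false_eq_true, or_false,
    PySem.Chars.isIn_iff_infix]
  constructor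
  · rintro (h | h | h | h | h | h | h | h | h | h | h | h | h)
    · obtain ⟨i, hpre, hF, hsuf⟩ := (pv_infix_cc '_' '_' F N).mp h
      exact ⟨i, hF, Or.inl ⟨⟨hpre.1, Or.inl hpre.2⟩, Or.inl hsuf⟩⟩
    · obtain ⟨i, hpre, hF, hsuf⟩ := (pv_infix_cc '-' '-' F N).mp h
      exact ⟨i, hF, Or.inl ⟨⟨hpre.1, Or.inr hpre.2⟩, Or.inr hsuf⟩⟩
    · obtain ⟨i, hpre, hF, hsuf⟩ := (pv_infix_cc '_' '-' F N).mp h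
      exact ⟨i, hF, Or.inl ⟨⟨hpre.1, Or.inl hpre.2⟩, Or.inr hsuf⟩⟩
    · obtain ⟨i, hpre, hF, hsuf⟩ := (pv_infix_cc '-' '_' F N).mp h
      exact ⟨i, hF, Or.inl ⟨⟨hpre.1, Or.inr hpre.2⟩, Or.inl hsuf⟩⟩
    · obtain ⟨i, hpre, hF, hsuf⟩ := (pv_infix_cc '.' '.' F N).mp h
      exact ⟨i, hF, Or.inr (Or.inl ⟨hpre, Or.inl hsuf⟩)⟩
    · obtain ⟨i, hpre, hF, hsuf⟩ := (pv_infix_cc '.' '_' F N).mp h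
      exact ⟨i, hF, Or.inr (Or.inl ⟨hpre, Or.inr hsuf⟩)⟩
    · obtain ⟨i, hpre, hF, hsuf⟩ := (pv_infix_cc '_' '.' F N).mp h
      exact ⟨i, hF, Or.inr (Or.inr (Or.inl ⟨hpre, hsuf⟩))⟩
    · obtain ⟨i, h2, hom, hF⟩ := (pv_infix_left2 'O' 'M' F N).mp h
      exact ⟨i, hF, Or.inr (Or.inr (Or.inr (Or.inl ⟨h2, hom⟩)))⟩
    · obtain ⟨i, hF, hom⟩ := (pv_infix_right ['O','M'] F N).mp h
      exact ⟨i, hF, Or.inr (Or.inr (Or.inr (Or.inr (Or.inl hom))))⟩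
    -- _F.FITS and _F.FTZ imply the _F. context (clause 3)
    · obtain ⟨i, hpre, hF, hsuf⟩ := (pv_infix_cw '_' ['.','F','I','T','S'] F N).mp h
      have : N[i+F.length]? = some '.' := by
        rw [← List.head?_drop]; exact pv_head_of_prefix hsuf
      exact ⟨i, hF, Or.inr (Or.inr (Or.inl ⟨hpre, this⟩))⟩
    · obtain ⟨i, hpre, hF, hsuf⟩ := (pv_infix_cw '_' ['.','F','T','Z'] F N).mp h
      have : N[i+F.length]? = some '.' := by
        rw [← List.head?_drop]; exact pv_head_of_prefix hsuf
      exact ⟨i, hF, Or.inr (Or.inr (Or.inl ⟨hpre, this⟩))⟩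
    · obtain ⟨i, hpre, hF, hsuf⟩ := (pv_infix_cw '-' ['.','F','I','T','S'] F N).mp h
      exact ⟨i, hF, Or.inr (Or.inr (Or.inr (Or.inr (Or.inr ⟨hpre, Or.inl hsuf⟩))))⟩
    · obtain ⟨i, hpre, hF, hsuf⟩ := (pv_infix_cw '-' ['.','F','T','Z'] F N).mp h
      exact ⟨i, hF, Or.inr (Or.inr (Or.inr (Or.inr (Or.inr ⟨hpre, Or.inr hsuf⟩))))⟩
  · rintro ⟨i, hF, hc⟩
    rcases hc with ⟨⟨hi, hpc⟩, hsc⟩ | ⟨hpre, hsc⟩ | ⟨hpre, hsuf⟩ | ⟨h2, hom⟩ | hom | ⟨hpre, hsw⟩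
    · rcases hpc with hpc | hpc <;> rcases hsc with hsc | hsc
      · exact Or.inl ((pv_infix_cc '_' '_' F N).mpr ⟨i, ⟨hi, hpc⟩, hF, hsc⟩)
      · exact Or.inr (Or.inr (Or.inl ((pv_infix_cc '_' '-' F N).mpr ⟨i, ⟨hi, hpc⟩, hF, hsc⟩)))
      · exact Or.inr (Or.inr (Or.inr (Or.inl ((pv_infix_cc '-' '_' F N).mpr ⟨i, ⟨hi, hpc⟩, hF, hsc⟩))))
      · exact Or.inr (Or.inl ((pv_infix_cc '-' '-' F N).mpr ⟨i, ⟨hi, hpc⟩, hF, hsc⟩))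
    · rcases hsc with hsc | hsc
      · exact Or.inr (Or.inr (Or.inr (Or.inr (Or.inl ((pv_infix_cc '.' '.' F N).mpr ⟨i, hpre, hF, hsc⟩)))))
      · exact Or.inr (Or.inr (Or.inr (Or.inr (Or.inr (Or.inl ((pv_infix_cc '.' '_' F N).mpr ⟨i, hpre, hF, hsc⟩))))))
    · exact Or.inr (Or.inr (Or.inr (Or.inr (Or.inr (Or.inr (Or.inl ((pv_infix_cc '_' '.' F N).mpr ⟨i, hpre, hF, hsuf⟩)))))))
    · exact Or.inr (Or.inr (Or.inr (Or.inr (Or.inr (Or.inr (Or.inr (Or.inl ((pv_infix_left2 'O' 'M' F N).mpr ⟨i, h2, hom, hF⟩))))))))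
    · exact Or.inr (Or.inr (Or.inr (Or.inr (Or.inr (Or.inr (Or.inr (Or.inr (Or.inl ((pv_infix_right ['O','M'] F N).mpr ⟨i, hF, hom⟩)))))))))
    · rcases hsw with hsw | hsw
      · exact Or.inr (Or.inr (Or.inr (Or.inr (Or.inr (Or.inr (Or.inr (Or.inr (Or.inr (Or.inr (Or.inr (Or.inl ((pv_infix_cw '-' ['.','F','I','T','S'] F N).mpr ⟨i, hpre, hF, hsw⟩))))))))))))
      · exact Or.inr (Or.inr (Or.inr (Or.inr (Or.inr (Or.inr (Or.inr (Or.inr (Or.inr (Or.inr (Or.inr (Or.inr ((pv_infix_cw '-' ['.','F','T','Z'] F N).mpr ⟨i, hpre, hF, hsw⟩))))))))))))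

theorem pv_main (N F : List Char) :
    (pvPatsA F).any (fun p => PySem.Chars.isIn p N) = pvScan N F 0 (N.length + 1 - F.length) := by
  rw [Bool.eq_iff_iff, pv_exists_iff, pv_scan_iff]
  constructor
  · rintro ⟨i, hF, hc⟩
    have hb := pv_good_bound N F i hF hc
    exact ⟨i, Nat.zero_le _, by omega, hF, hc⟩
  · rintro ⟨j, _, _, hF, hc⟩
    exact ⟨j, hF, hc⟩

-- ===== VERDICT (by name: the statement is the Claim_ definition above) =====
theorem looks_like_filter_in_name_spec : Claim_equal_looks_like_filter_in_name := by
  intro name filt _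
  unfold Spec_looks_like_filter_in_name looks_like_filter_in_name looks_like_filter_in_name_alt
  exact pv_main (PySem.Chars.upper name.toList) (PySem.Chars.upper filt.toList)
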